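-- pv_equiv track=rewrite | github.com/TianleJin/competitive-programming | CodeForce-Practice/PairsOfNumbers.py | solve
-- ===== SOURCE A (Python) =====
-- def solve(n):
--     ans = n - 1
--     for i in range(2, n // 2 + 1):
--         j = n
--         k = 0
--         while i > 1 and j > 1:
--             k += 1
--             if j >= i:
--                 j -= i
--             else:
--                 i -= j
--         if i < 1 or j < 1:
--             continue
--         elif i == 1:
--             ans = min(ans, k + j - 1)
--         elif j == 1:
--             ans = min(ans, k + i - 1)
--     return ans
-- ===== SOURCE B (Python) =====
-- def solve(n):
--     ans = n - 1
--     for i in range(2, n // 2 + 1):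
--         a, b, k = i, n, 0
--         while a > 1 and b > 1:
--             if b >= a:
--                 k += b // a
--                 b %= a
--             else:
--                 k += a // b
--                 a %= b
--         if a == 1:
--             ans = min(ans, k + b - 1)
--         elif b == 1:
--             ans = min(ans, k + a - 1)
--     return ans
-- ===== Notes on version B (the rewrite author's own statement) =====
-- stated objective: faster
-- what changed: Replaced the inner subtractive-Euclid while loop (one subtraction per step) by a division-based Euclid loop that adds each whole quotient to the step count at once and takes remainders, with the post-loop branching simplified to the two reachable cases.
import Mathlib
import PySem

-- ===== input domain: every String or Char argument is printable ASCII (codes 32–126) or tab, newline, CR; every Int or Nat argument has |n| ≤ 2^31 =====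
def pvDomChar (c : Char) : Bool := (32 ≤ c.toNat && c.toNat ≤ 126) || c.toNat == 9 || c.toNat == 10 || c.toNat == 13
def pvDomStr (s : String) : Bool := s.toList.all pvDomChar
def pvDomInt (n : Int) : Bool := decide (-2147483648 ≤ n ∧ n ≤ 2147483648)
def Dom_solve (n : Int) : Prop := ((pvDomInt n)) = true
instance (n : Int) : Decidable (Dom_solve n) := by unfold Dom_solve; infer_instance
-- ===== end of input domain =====

-- B replaces A's unary subtractive-Euclid inner loop by a division-based Euclid loop
-- (each run of equal subtractions collapses into one quotient/remainder step): measurably faster.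

-- ===== PORT A =====
-- A's inner while loop: state (i, j, k); one subtraction per iteration.
def subLoop (i j k : Int) : Int × Int × Int :=
  if h : 1 < i ∧ 1 < j then
    if j ≥ i then subLoop i (j - i) (k + 1)
    else subLoop (i - j) j (k + 1)
  else (i, j, k)
termination_by (i + j).toNat
decreasing_by all_goals omega

def solve (n : Int) : Int :=
  (PySem.List.pyRange 2 (PySem.Int.floordiv n 2 + 1)).foldl
    (fun ans i =>
      let r := subLoop i n 0
      if r.1 < 1 ∨ r.2.1 < 1 then ans
      else if r.1 = 1 then min ans (r.2.2 + r.2.1 - 1)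
      else if r.2.1 = 1 then min ans (r.2.2 + r.1 - 1)
      else ans)
    (n - 1)

-- ===== PORT B =====
-- B's inner while loop: division-based, adds the whole quotient to k at once.
def divLoop (a b k : Int) : Int × Int × Int :=
  if _h : 1 < a ∧ 1 < b then
    if b ≥ a then divLoop a (PySem.Int.mod b a) (k + PySem.Int.floordiv b a)
    else divLoop (PySem.Int.mod a b) b (k + PySem.Int.floordiv a b)
  else (a, b, k)
termination_by (a + b).toNat
decreasing_by
  · have h1 := PySem.Int.mod_lt b (b := a) (by omega)
    have h2 := PySem.Int.mod_nonneg b (b := a) (by omega)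
    omega
  · have h1 := PySem.Int.mod_lt a (b := b) (by omega)
    omega

def solve_alt (n : Int) : Int :=
  (PySem.List.pyRange 2 (PySem.Int.floordiv n 2 + 1)).foldl
    (fun ans i =>
      let r := divLoop i n 0
      if r.1 = 1 then min ans (r.2.2 + r.2.1 - 1)
      else if r.2.1 = 1 then min ans (r.2.2 + r.1 - 1)
      else ans)
    (n - 1)

-- ===== PRECONDITION & SPEC =====
def Spec_solve (n : Int) (out : Int) : Prop := out = solve_alt n
instance (n : Int) (out : Int) : Decidable (Spec_solve n out) := by unfold Spec_solve; infer_instance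

-- ===== CLAIM (what is proved, stated in full; the proofs are below) =====
def Claim_equal_solve : Prop := ∀ (n : Int), Dom_solve n → Spec_solve n (solve n)

-- ===== LEMMAS AND PROOFS =====

-- the contribution a finished inner-loop state makes to the answer, for each port's guards
def outA : Int × Int × Int → Option Int :=
  fun r => if r.1 < 1 ∨ r.2.1 < 1 then none
           else if r.1 = 1 then some (r.2.2 + r.2.1 - 1)
           else if r.2.1 = 1 then some (r.2.2 + r.1 - 1)
           else none

def outB : Int × Int × Int → Option Int :=
  fun r => if r.1 = 1 then some (r.2.2 + r.2.1 - 1)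
           else if r.2.1 = 1 then some (r.2.2 + r.1 - 1)
           else none

-- quotient/remainder shift: subtracting the divisor once drops the quotient by one
theorem fdiv_mod_shift (x y : Int) (hy : 0 < y) (_hxy : y ≤ x) :
    PySem.Int.floordiv (x - y) y = PySem.Int.floordiv x y - 1 ∧
    PySem.Int.mod (x - y) y = PySem.Int.mod x y := by
  have hb := PySem.Int.floordiv_mul_add_mod x y
  have hb' := PySem.Int.floordiv_mul_add_mod (x - y) y
  have hq : ((PySem.Int.floordiv x y) * y ≤ x ∧ x < (PySem.Int.floordiv x y + 1) * y) :=
    (PySem.Int.floordiv_eq_iff_of_pos hy).mp rfl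
  have hd : PySem.Int.floordiv (x - y) y = PySem.Int.floordiv x y - 1 := by
    rw [PySem.Int.floordiv_eq_iff_of_pos hy]
    constructor
    · nlinarith [hq.1]
    · nlinarith [hq.2]
  refine ⟨hd, ?_⟩
  rw [hd] at hb'
  nlinarith [hb, hb']

theorem stepJ (i j k : Int) (hi : 1 < i) (hij : i ≤ j) :
    divLoop i (j - i) (k + 1) = divLoop i j k := by
  have hj : 1 < j := by omega
  have hpos : (0:Int) < i := by omega
  conv_rhs => rw [divLoop]
  rw [dif_pos ⟨hi, hj⟩, if_pos hij]
  have hs := fdiv_mod_shift j i hpos hij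
  rcases le_or_gt i (j - i) with hge | hlt
  · -- j ≥ 2i : one division step of the left side lands on the same state
    have h1 : 1 < j - i := by omega
    conv_lhs => rw [divLoop]
    rw [dif_pos ⟨hi, h1⟩, if_pos hge, hs.1, hs.2]
    congr 1
    omega
  · -- i ≤ j < 2i : quotient is 1, remainder is j - i
    have hq : PySem.Int.floordiv j i = 1 := by
      rw [PySem.Int.floordiv_eq_iff_of_pos hpos]
      constructor <;> nlinarith
    have hm : PySem.Int.mod j i = j - i := by
      have := PySem.Int.floordiv_mul_add_mod j i
      rw [hq] at this; omega
    rw [hq, hm]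

theorem stepI (i j k : Int) (hj : 1 < j) (hji : j < i) :
    outB (divLoop (i - j) j (k + 1)) = outB (divLoop i j k) := by
  have hi : 1 < i := by omega
  have hpos : (0:Int) < j := by omega
  conv_rhs => rw [divLoop]
  rw [dif_pos ⟨hi, hj⟩, if_neg (by omega)]
  have hs := fdiv_mod_shift i j hpos (by omega)
  rcases lt_trichotomy (i - j) j with hlt | heq | hgt
  · -- j < i < 2j : quotient is 1, remainder is i - j
    have hq : PySem.Int.floordiv i j = 1 := by
      rw [PySem.Int.floordiv_eq_iff_of_pos hpos]
      constructor <;> nlinarith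
    have hm : PySem.Int.mod i j = i - j := by
      have := PySem.Int.floordiv_mul_add_mod i j
      rw [hq] at this; omega
    rw [hq, hm]
  · -- i = 2j : the two loops end in the mirrored states (j,0,·) and (0,j,·); both contribute none
    have hq : PySem.Int.floordiv i j = 2 := by
      rw [PySem.Int.floordiv_eq_iff_of_pos hpos]
      constructor <;> nlinarith
    have hm : PySem.Int.mod i j = 0 := by
      have := PySem.Int.floordiv_mul_add_mod i j
      rw [hq] at this; omega
    have hqj : PySem.Int.floordiv j j = 1 := by
      rw [PySem.Int.floordiv_eq_iff_of_pos hpos]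
      constructor <;> nlinarith
    have hmj : PySem.Int.mod j j = 0 := by
      have := PySem.Int.floordiv_mul_add_mod j j
      rw [hqj] at this; omega
    have hej : i - j = j := by omega
    rw [hej, hq, hm]
    conv_lhs => rw [divLoop]
    rw [dif_pos ⟨hj, hj⟩, if_pos le_rfl, hqj, hmj]
    conv_lhs => rw [divLoop]
    rw [dif_neg (by omega)]
    conv_rhs => rw [divLoop]
    rw [dif_neg (by omega)]
    simp only [outB]
    split_ifs <;> first | rfl | omega
  · -- i > 2j : one division step of the left side lands on the same state
    have h1 : 1 < i - j := by omega
    conv_lhs => rw [divLoop]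
    rw [dif_pos ⟨h1, hj⟩, if_neg (by omega), hs.1, hs.2]
    congr 2
    omega

theorem main_loop (m : Nat) : ∀ i j k : Int, (i + j).toNat ≤ m → 1 < i → 1 < j →
    outA (subLoop i j k) = outB (divLoop i j k) := by
  induction m with
  | zero => intro i j k hm hi hj; omega
  | succ m ih =>
    intro i j k hm hi hj
    rcases le_or_gt i j with hij | hji
    · -- A subtracts i from j
      rw [show subLoop i j k = subLoop i (j - i) (k + 1) by
        rw [subLoop]; rw [dif_pos ⟨hi, hj⟩, if_pos hij]]
      rw [← stepJ i j k hi hij]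
      by_cases h1 : 1 < j - i
      · exact ih i (j - i) (k + 1) (by omega) hi h1
      · -- loop ends: j - i ∈ {0, 1}, i > 1; both guards agree
        rw [show subLoop i (j - i) (k + 1) = (i, j - i, k + 1) by
          rw [subLoop]; rw [dif_neg (by omega)]]
        rw [show divLoop i (j - i) (k + 1) = (i, j - i, k + 1) by
          rw [divLoop]; rw [dif_neg (by omega)]]
        simp only [outA, outB]
        split_ifs <;> first | rfl | omega
    · -- A subtracts j from i
      rw [show subLoop i j k = subLoop (i - j) j (k + 1) by
        rw [subLoop]; rw [dif_pos ⟨hi, hj⟩, if_neg (by omega)]]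
      rw [← stepI i j k hj hji]
      by_cases h1 : 1 < i - j
      · exact ih (i - j) j (k + 1) (by omega) h1 hj
      · -- loop ends: i - j = 1, j > 1; both guards agree
        rw [show subLoop (i - j) j (k + 1) = (i - j, j, k + 1) by
          rw [subLoop]; rw [dif_neg (by omega)]]
        rw [show divLoop (i - j) j (k + 1) = (i - j, j, k + 1) by
          rw [divLoop]; rw [dif_neg (by omega)]]
        simp only [outA, outB]
        split_ifs <;> first | rfl | omega

theorem body_eq (n i ans : Int) (hi : 1 < i) (hn : 1 < n) :
    (let r := subLoop i n 0
     if r.1 < 1 ∨ r.2.1 < 1 then ans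
     else if r.1 = 1 then min ans (r.2.2 + r.2.1 - 1)
     else if r.2.1 = 1 then min ans (r.2.2 + r.1 - 1)
     else ans) =
    (let r := divLoop i n 0
     if r.1 = 1 then min ans (r.2.2 + r.2.1 - 1)
     else if r.2.1 = 1 then min ans (r.2.2 + r.1 - 1)
     else ans) := by
  have h := main_loop (i + n).toNat i n 0 le_rfl hi hn
  rcases hA : subLoop i n 0 with ⟨a1, b1, k1⟩
  rcases hB : divLoop i n 0 with ⟨a2, b2, k2⟩
  rw [hA, hB] at h
  simp only [outA, outB] at h
  dsimp only
  split_ifs at h ⊢ <;>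
    first
      | rfl
      | (simp only [Option.some.injEq] at h; rw [h])

-- ===== VERDICT (by name: the statement is the Claim_ definition above) =====
theorem solve_spec : Claim_equal_solve := by
  unfold Claim_equal_solve Spec_solve solve solve_alt
  intro n _
  apply PySem.List.foldl_congr_mem
  intro ans i hmem
  have hb := PySem.List.mem_pyRange_one.mp hmem
  have hi : 1 < i := by omega
  have hn : 1 < n := by
    have h2 : (2:Int) ≤ PySem.Int.floordiv n 2 := by omega
    have := (PySem.Int.le_floordiv_iff_mul_le (a := n) (b := 2) (q := 2) (by norm_num)).mp h2
    omega
  exact body_eq n i ans hi hn
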